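-- pv_equiv track=rewrite | github.com/obiofiong/Python-algorithms-and-data-structures | practices/googleInterviewPrep.py | minimumServerDifference
-- ===== SOURCE A (Python) =====
-- def minimumServerDifference(A):
--     # empty ipnput test case
--     # A = sorted(A)
--     A.sort()
--     serverA = 0
--     serverB = 0
--     for i in range(len(A)-1,-1,-1):
--         if serverA - serverB <= 0:
--              serverA += A[i]
--         else :
--             serverB += A[i]
--     return abs(serverA - serverB)
-- ===== SOURCE B (Python) =====
-- def minimumServerDifference(A):
--     # Single-accumulator fold: keep only the non-negative gap |serverA-serverB|;
--     # adding the next-largest element to the lighter server turns gap into abs(x - gap).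
--     A.sort()
--     gap = 0
--     for x in reversed(A):
--         gap = abs(x - gap)
--     return gap
-- ===== Notes on version B (the rewrite author's own statement) =====
-- stated objective: simpler
-- what changed: Replaces the two server accumulators and the if/else branch with a single non-negative gap folded as gap = abs(x - gap) over the elements from largest to smallest.
import Mathlib
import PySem

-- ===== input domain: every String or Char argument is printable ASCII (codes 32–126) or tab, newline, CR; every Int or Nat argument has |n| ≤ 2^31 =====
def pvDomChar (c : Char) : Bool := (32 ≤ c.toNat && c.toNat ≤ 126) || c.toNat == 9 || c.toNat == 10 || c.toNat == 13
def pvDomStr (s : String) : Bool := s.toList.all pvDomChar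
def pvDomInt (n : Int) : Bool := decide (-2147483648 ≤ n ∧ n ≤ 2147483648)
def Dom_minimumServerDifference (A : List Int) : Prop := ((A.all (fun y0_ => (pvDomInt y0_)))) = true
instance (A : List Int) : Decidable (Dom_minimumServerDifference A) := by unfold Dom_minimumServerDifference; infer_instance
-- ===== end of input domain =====

-- B replaces A's two server accumulators and if/else with a single non-negative gap
-- folded as gap = abs(x - gap) over the sorted elements from largest to smallest (simpler).
-- Both A and B sort the caller's list in place; the theorem is about the return value.


-- ===== PORT A =====
def minimumServerDifference (A : List Int) : Int :=
  let As := PySem.List.sorted A (fun x => x) false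
  let st := (PySem.List.pyRange ((As.length : Int) - 1) (-1) (-1)).foldl
    (fun (sv : Int × Int) i =>
      if sv.1 - sv.2 ≤ 0 then (sv.1 + PySem.List.pyGetD As i 0, sv.2)
      else (sv.1, sv.2 + PySem.List.pyGetD As i 0)) (0, 0)
  |st.1 - st.2|

-- ===== PORT B =====
def minimumServerDifference_alt (A : List Int) : Int :=
  (PySem.List.sorted A (fun x => x) false).reverse.foldl (fun g x => |x - g|) 0

-- ===== PRECONDITION & SPEC =====
def Spec_minimumServerDifference (A : List Int) (out : Int) : Prop := out = minimumServerDifference_alt A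
instance (A : List Int) (out : Int) : Decidable (Spec_minimumServerDifference A out) := by unfold Spec_minimumServerDifference; infer_instance

-- ===== CLAIM (what is proved, stated in full; the proofs are below) =====
def Claim_equal_minimumServerDifference : Prop := ∀ (A : List Int), Dom_minimumServerDifference A → Spec_minimumServerDifference A (minimumServerDifference A)

-- ===== LEMMAS AND PROOFS =====

-- Core invariant: the abs difference of the two-accumulator fold equals the
-- single-gap fold started from |a - b|.
theorem pv_gap_invariant (l : List Int) : ∀ (a b : Int),
    |((l.foldl (fun (sv : Int × Int) x =>
        if sv.1 - sv.2 ≤ 0 then (sv.1 + x, sv.2) else (sv.1, sv.2 + x)) (a, b)).1 -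
      (l.foldl (fun (sv : Int × Int) x =>
        if sv.1 - sv.2 ≤ 0 then (sv.1 + x, sv.2) else (sv.1, sv.2 + x)) (a, b)).2)| =
    l.foldl (fun g x => |x - g|) |a - b| := by
  induction l with
  | nil => intro a b; simp
  | cons x xs ih =>
    intro a b
    by_cases h : a - b ≤ 0
    · have hab : |a - b| = -(a - b) := abs_of_nonpos h
      simp only [List.foldl_cons, if_pos h, ih]
      rw [hab, show x - -(a - b) = a + x - b by ring]
    · have hab : |a - b| = a - b := abs_of_pos (by omega)
      simp only [List.foldl_cons, if_neg h, ih]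
      rw [hab]
      congr 1
      rw [show a - (b + x) = -(x - (a - b)) by ring, abs_neg]

-- A's index loop over range(len-1, -1, -1) is the fold over the sorted list reversed.
theorem pv_countdown_fold (xs : List Int) (f : (Int × Int) → Int → (Int × Int)) (init : Int × Int) :
    (PySem.List.pyRange ((xs.length : Int) - 1) (-1) (-1)).foldl
      (fun sv i => f sv (PySem.List.pyGetD xs i 0)) init =
    xs.reverse.foldl f init := by
  have h1 : PySem.List.pyRange ((xs.length : Int) - 1) (-1) (-1)
      = (PySem.List.pyRange 0 (xs.length : Int) 1).reverse := by
    rw [PySem.List.pyRange_neg_one_eq_reverse]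
    norm_num
  have h2 : ((PySem.List.pyRange 0 (xs.length : Int) 1).reverse.map
        (fun i => PySem.List.pyGetD xs i 0)).foldl f init
      = (PySem.List.pyRange 0 (xs.length : Int) 1).reverse.foldl
        (fun sv i => f sv (PySem.List.pyGetD xs i 0)) init := List.foldl_map
  rw [h1, ← h2, List.map_reverse, PySem.List.map_pyGetD_pyRange_zero']

-- ===== VERDICT (by name: the statement is the Claim_ definition above) =====
theorem minimumServerDifference_spec : Claim_equal_minimumServerDifference := by
  intro A _
  unfold Spec_minimumServerDifference minimumServerDifference minimumServerDifference_alt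
  dsimp only
  rw [pv_countdown_fold (PySem.List.sorted A (fun x => x) false)
    (fun (sv : Int × Int) x => if sv.1 - sv.2 ≤ 0 then (sv.1 + x, sv.2) else (sv.1, sv.2 + x)) (0, 0)]
  rw [pv_gap_invariant]
  norm_num
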